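-- pv_equiv track=rewrite | github.com/chin-tech/FurAngelInvoiceParser | src/gfuncs.py | prune_by_threadId
-- ===== SOURCE A (Python) =====
-- from collections import defaultdict
--
-- def prune_by_threadId(messages: list[dict]) -> list[dict]:
--     """Prunes messages belonging to the same conversation"""
--     assert messages != None
--     assert len(messages) != 0
--     msgs = defaultdict(list)
--     for m in messages:
--         msgs[m['threadId']].append(m['id'])
--     messages = [{'id': v[0], 'threadId': k} for k, v in msgs.items()]
--     return messages
-- ===== SOURCE B (Python) =====
-- def prune_by_threadId(messages: list[dict]) -> list[dict]:
--     """Prunes messages belonging to the same conversation"""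
--     assert messages != None
--     assert len(messages) != 0
--     seen = set()
--     result = []
--     for m in messages:
--         tid = m['threadId']
--         mid = m['id']
--         if tid not in seen:
--             seen.add(tid)
--             result.append({'id': mid, 'threadId': tid})
--     return result
-- ===== Notes on version B (the rewrite author's own statement) =====
-- stated objective: simpler
-- what changed: Replaces the group-all-ids-per-thread defaultdict plus a second projection pass with a single pass that keeps a seen-set of threadIds and emits each thread's first record immediately.
import Mathlib
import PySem

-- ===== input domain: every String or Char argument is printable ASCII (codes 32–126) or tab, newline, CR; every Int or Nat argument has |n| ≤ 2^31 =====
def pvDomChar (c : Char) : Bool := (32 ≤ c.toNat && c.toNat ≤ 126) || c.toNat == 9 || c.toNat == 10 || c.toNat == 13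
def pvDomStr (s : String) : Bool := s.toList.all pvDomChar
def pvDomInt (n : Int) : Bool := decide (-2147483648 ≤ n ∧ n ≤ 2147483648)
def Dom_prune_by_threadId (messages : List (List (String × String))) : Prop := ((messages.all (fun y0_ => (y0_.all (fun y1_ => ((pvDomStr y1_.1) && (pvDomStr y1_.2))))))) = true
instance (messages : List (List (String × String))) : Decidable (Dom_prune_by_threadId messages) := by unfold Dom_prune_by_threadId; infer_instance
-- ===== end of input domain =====

-- B replaces A's group-then-project (defaultdict of all ids per thread, then take v[0]) by a
-- single pass with a seen-set that emits each thread's first record immediately (objective: simpler).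

-- m['threadId'] / m['id'] as dict lookups (total via default ""; Pre_ guarantees the keys exist)
def pvTid (m : List (String × String)) : String := (PySem.Dict.mk m).getD "threadId" ""
def pvMid (m : List (String × String)) : String := (PySem.Dict.mk m).getD "id" ""

-- ===== PORT A =====
def prune_by_threadId (messages : List (List (String × String))) : List (List (String × String)) :=
  -- msgs = defaultdict(list); for m: msgs[m['threadId']].append(m['id'])  (append = overwrite with old ++ [id])
  let msgs : PySem.Dict String (List String) :=
    messages.foldl (fun d m => d.insert (pvTid m) (d.getD (pvTid m) [] ++ [pvMid m])) PySem.Dict.empty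
  -- [{'id': v[0], 'threadId': k} for k, v in msgs.items()]
  msgs.items.map (fun kv => [("id", PySem.List.pyGetD kv.2 0 ""), ("threadId", kv.1)])

-- ===== PORT B =====
def prune_by_threadId_alt (messages : List (List (String × String))) : List (List (String × String)) :=
  (messages.foldl (fun st m =>
      let tid := pvTid m
      let mid := pvMid m
      if PySem.Set.contains st.1 tid then st
      else (PySem.Set.add st.1 tid, st.2 ++ [[("id", mid), ("threadId", tid)]]))
    ((PySem.Set.empty : PySem.Set String), ([] : List (List (String × String))))).2

-- ===== PRECONDITION & SPEC =====
-- Pre_ excludes exactly the inputs where Python A raises: the empty list (assert) and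
-- messages missing the 'threadId' or 'id' key (KeyError).
def Pre_prune_by_threadId (messages : List (List (String × String))) : Prop :=
  messages ≠ [] ∧ ∀ m ∈ messages,
    (PySem.Dict.mk m).contains "threadId" = true ∧ (PySem.Dict.mk m).contains "id" = true
instance (messages : List (List (String × String))) : Decidable (Pre_prune_by_threadId messages) := by
  unfold Pre_prune_by_threadId; infer_instance
def pvWitness_prune_by_threadId : (List (List (String × String))) :=
  [[("threadId", "t1"), ("id", "m1")], [("threadId", "t1"), ("id", "m2")], [("threadId", "t2"), ("id", "m3")]]

def Spec_prune_by_threadId (messages : List (List (String × String))) (out : List (List (String × String))) : Prop := out = prune_by_threadId_alt messages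
instance (messages : List (List (String × String))) (out : List (List (String × String))) : Decidable (Spec_prune_by_threadId messages out) := by unfold Spec_prune_by_threadId; infer_instance

-- ===== CLAIM (what is proved, stated in full; the proofs are below) =====
def Claim_equal_prune_by_threadId : Prop := ∀ (messages : List (List (String × String))), Dom_prune_by_threadId messages → Pre_prune_by_threadId messages → Spec_prune_by_threadId messages (prune_by_threadId messages)

-- ===== LEMMAS AND PROOFS =====

-- the record A builds from one entry (k, ids) of its dict
def pvRender (kv : String × List String) : List (String × String) :=
  [("id", PySem.List.pyGetD kv.2 0 ""), ("threadId", kv.1)]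

theorem pv_main :
    ∀ (l : List (List (String × String))) (d : PySem.Dict String (List String))
      (s : PySem.Set String) (acc : List (List (String × String))),
    (∀ k, k ∈ s ↔ k ∈ d.keys) →
    d.keys.Nodup →
    (∀ p ∈ d.items, p.2 ≠ []) →
    acc = d.items.map pvRender →
    (l.foldl (fun st m =>
        let tid := pvTid m
        let mid := pvMid m
        if PySem.Set.contains st.1 tid then st
        else (PySem.Set.add st.1 tid, st.2 ++ [[("id", mid), ("threadId", tid)]])) (s, acc)).2
      = (l.foldl (fun d m => d.insert (pvTid m) (d.getD (pvTid m) [] ++ [pvMid m])) d).items.map pvRender := by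
  intro l
  induction l with
  | nil => intro d s acc _ _ _ hacc; simpa using hacc
  | cons m l ih =>
    intro d s acc hs hnd hne hacc
    simp only [List.foldl_cons]
    by_cases hmem : pvTid m ∈ d.keys
    · -- thread already seen: B skips, A's insert rewrites an existing entry without changing its head
      have hsc : PySem.Set.contains s (pvTid m) = true := by
        rw [PySem.Set.contains_iff]; exact (hs _).mpr hmem
      have hdc : d.contains (pvTid m) = true := by
        rw [PySem.Dict.contains_iff_mem_keys]; exact hmem
      rw [hsc]
      simp only [if_true]
      apply ih
      · intro k
        rw [hs k, PySem.Dict.mem_keys_insert]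
        constructor
        · exact Or.inr
        · rintro (rfl | h) <;> [exact hmem; exact h]
      · exact PySem.Dict.nodup_keys_insert _ _ _ hnd
      · intro p hp
        rcases (PySem.Dict.mem_items_insert _ _ _ _).mp hp with rfl | ⟨hpd, _⟩
        · simp
        · exact hne p hpd
      · rw [hacc, PySem.Dict.items_insert_of_contains _ _ hdc, List.map_map]
        apply List.map_congr_left
        intro p hp
        by_cases hpk : p.1 = pvTid m
        · have hget : d.getD (pvTid m) [] = p.2 := by
            have hmemi : (pvTid m, p.2) ∈ d.items := by rw [← hpk]; simpa using hp
            exact PySem.Dict.getD_of_mem_items _ hmemi hnd []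
          have hpe : p.2 ≠ [] := hne p hp
          simp only [Function.comp, hpk, beq_self_eq_true, if_true, pvRender, hget]
          cases h2 : p.2 with
          | nil => exact absurd h2 hpe
          | cons a t => simp [PySem.List.pyGetD_zero]
        · simp [Function.comp, pvRender, hpk]
    · -- new thread: both sides append one record for it
      have hsc : PySem.Set.contains s (pvTid m) = false := by
        rw [← Bool.not_eq_true, PySem.Set.contains_iff]
        exact fun h => hmem ((hs _).mp h)
      have hdc : d.contains (pvTid m) = false := by
        rw [← Bool.not_eq_true, PySem.Dict.contains_iff_mem_keys]
        exact hmem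
      rw [hsc]
      simp only [Bool.false_eq_true, if_false]
      apply ih
      · intro k
        rw [PySem.Set.mem_add, hs k, PySem.Dict.mem_keys_insert]
        tauto
      · exact PySem.Dict.nodup_keys_insert _ _ _ hnd
      · intro p hp
        rcases (PySem.Dict.mem_items_insert _ _ _ _).mp hp with rfl | ⟨hpd, _⟩
        · simp
        · exact hne p hpd
      · rw [PySem.Dict.items_insert_of_not_contains _ _ hdc, List.map_append, ← hacc]
        simp [pvRender, PySem.Dict.getD_of_not_contains _ _ hdc, PySem.List.pyGetD_zero]

-- ===== VERDICT (by name: the statement is the Claim_ definition above) =====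
theorem prune_by_threadId_spec : Claim_equal_prune_by_threadId := by
  intro messages _ _
  unfold Spec_prune_by_threadId prune_by_threadId prune_by_threadId_alt
  exact (pv_main messages PySem.Dict.empty PySem.Set.empty []
    (by simp [PySem.Set.empty, PySem.Dict.keys_empty])
    (by simp [PySem.Dict.keys_empty])
    (by simp [PySem.Dict.empty])
    (by simp [PySem.Dict.empty])).symm
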